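-- pv_equiv track=rewrite | github.com/JangYeonji/Python-Algorithm | 시험4.py | solution
-- ===== SOURCE A (Python) =====
-- def solution(price, cost):
--     answer = [0]*len(price)
--     for idx,i in enumerate(price):
--         for jdx,j in enumerate(cost):
--             if i>j and i<=price[jdx]:
--                 answer[idx] += i-j
--
--     if max(answer)==0:
--         return 0
--
--     index = []
--     result = int(1e9)
--     for idx,i in enumerate(answer):
--         if i==max(answer):
--             index.append(idx)
--     for i in index:
--         if result>price[i]:
--             result = price[i]
--     return result
-- ===== SOURCE B (Python) =====
-- def solution(price, cost):
--     # Sort-and-sweep: answer(v) = v*cnt - csum over pairs with cost < v <= price,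
--     # from two sorted prefix sweeps instead of the O(n*m) double loop.
--     pairs = list(zip(cost, price))
--     costs = sorted(c for c, q in pairs)
--     maxes = sorted(((max(c, q), c) for c, q in pairs), key=lambda t: t[0])
--     f = {}
--     i1 = c1 = s1 = 0
--     i2 = c2 = s2 = 0
--     for v in sorted(set(price)):
--         while i1 < len(costs) and costs[i1] < v:
--             c1 += 1
--             s1 += costs[i1]
--             i1 += 1
--         while i2 < len(maxes) and maxes[i2][0] < v:
--             c2 += 1
--             s2 += maxes[i2][1]
--             i2 += 1
--         f[v] = v * (c1 - c2) - (s1 - s2)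
--     answer = [f[v] for v in price]
--     m = max(answer)
--     if m == 0:
--         return 0
--     return min(p for p, a in zip(price, answer) if a == m)
-- ===== Notes on version B (the rewrite author's own statement) =====
-- stated objective: faster
-- what changed: Replaces the O(n*m) per-price inner scan over cost with a sort-and-sweep: sort costs and max(cost,price) keys once, sweep the sorted distinct prices with two prefix pointers maintaining running count/sum, so each answer is v*cnt - csum; the final step returns the minimum best-selling price directly.
-- intended difference: On inputs whose maximal aggregated difference is positive but attained only at prices above 10^9, A returns its INF initialiser 1000000000 instead of any actual price, while B returns the true minimal such price, which is the intended result. — e.g. on solution([2000000000], [1]): A returns 1000000000, B returns 2000000000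
import Mathlib
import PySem

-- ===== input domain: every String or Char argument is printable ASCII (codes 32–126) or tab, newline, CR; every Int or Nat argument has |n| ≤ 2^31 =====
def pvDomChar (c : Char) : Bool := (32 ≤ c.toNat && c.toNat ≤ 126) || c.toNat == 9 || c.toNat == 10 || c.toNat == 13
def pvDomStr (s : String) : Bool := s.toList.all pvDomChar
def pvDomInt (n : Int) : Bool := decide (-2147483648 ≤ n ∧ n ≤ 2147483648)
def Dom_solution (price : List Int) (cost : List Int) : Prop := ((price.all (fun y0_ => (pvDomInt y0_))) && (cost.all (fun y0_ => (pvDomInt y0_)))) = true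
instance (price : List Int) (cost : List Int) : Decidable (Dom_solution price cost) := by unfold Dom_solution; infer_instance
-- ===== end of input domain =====

-- B replaces A's O(n*m) double loop by a sort-and-sweep (two sorted prefix pointers
-- over costs and max(cost,price) keys, answer(v) = v*cnt - csum): asymptotically faster.

-- ===== PORT A =====
def solution (price : List Int) (cost : List Int) : Int :=
  let answer : List Int :=
    (PySem.List.enumerate price).foldl (fun ans idxi =>
      (PySem.List.enumerate cost).foldl (fun ans jdxj =>
        match PySem.List.pyGet? price jdxj.1 with
        | some pj =>
          if idxi.2 > jdxj.2 ∧ idxi.2 ≤ pj then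
            ans.set idxi.1.toNat (ans.getD idxi.1.toNat 0 + (idxi.2 - jdxj.2))
          else ans
        | none => ans) ans)
      (List.replicate price.length 0)
  match PySem.List.max? answer (fun x => x) with
  | none => 0  -- Python raises ValueError on empty `answer`; excluded by Pre_
  | some m =>
    if m = 0 then 0
    else
      let index : List Int :=
        (PySem.List.enumerate answer).foldl
          (fun acc p => if p.2 = m then acc ++ [p.1] else acc) []
      index.foldl (fun result i =>
        match PySem.List.pyGet? price i with
        | some pi => if result > pi then pi else result
        | none => result) 1000000000

-- ===== PORT B =====
structure SweepSt where
  r1 : List Int          -- unconsumed suffix of the sorted costs (pointer i1 in Source B)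
  c1 : Int
  s1 : Int
  r2 : List (Int × Int)  -- unconsumed suffix of the sorted (max, cost) pairs (pointer i2)
  c2 : Int
  s2 : Int
  f : PySem.Dict Int Int

-- the `while i1 < len(costs) and costs[i1] < v` loop of Source B
def advInt (v : Int) : List Int → Int → Int → Int × Int × List Int
  | [], c, s => (c, s, [])
  | x :: rest, c, s =>
    if x < v then advInt v rest (c + 1) (s + x) else (c, s, x :: rest)

-- the `while i2 < len(maxes) and maxes[i2][0] < v` loop of Source B
def advPair (v : Int) : List (Int × Int) → Int → Int → Int × Int × List (Int × Int)
  | [], c, s => (c, s, [])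
  | x :: rest, c, s =>
    if x.1 < v then advPair v rest (c + 1) (s + x.2) else (c, s, x :: rest)

def sweepStep (st : SweepSt) (v : Int) : SweepSt :=
  let a1 := advInt v st.r1 st.c1 st.s1
  let a2 := advPair v st.r2 st.c2 st.s2
  { r1 := a1.2.2, c1 := a1.1, s1 := a1.2.1,
    r2 := a2.2.2, c2 := a2.1, s2 := a2.2.1,
    f := st.f.insert v (v * (a1.1 - a2.1) - (a1.2.1 - a2.2.1)) }

def solution_alt (price : List Int) (cost : List Int) : Int :=
  let pairs := List.zip cost price
  let costs := PySem.List.sorted (pairs.map Prod.fst) (fun x => x) false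
  let maxes := PySem.List.sorted (pairs.map (fun cq => (max cq.1 cq.2, cq.1))) Prod.fst false
  let vals := PySem.List.sorted (PySem.Set.ofList price) (fun x => x) false
  let st := vals.foldl sweepStep ⟨costs, 0, 0, maxes, 0, 0, PySem.Dict.empty⟩
  let answer := price.map (fun v => st.f.getD v 0)
  match PySem.List.max? answer (fun x => x) with
  | none => 0  -- Python raises ValueError on empty; excluded by Pre_
  | some m =>
    if m = 0 then 0
    else
      match PySem.List.min?
          (((List.zip price answer).filter (fun pa => pa.2 = m)).map Prod.fst)
          (fun x => x) with
      | none => 0  -- Python's min over an empty generator raises; unreachable when answer is nonempty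
      | some r => r

-- ===== PRECONDITION & SPEC =====
-- Exactly the inputs on which A returns: price nonempty (else max([]) raises ValueError),
-- and A's short-circuited test `i>j and i<=price[jdx]` never evaluates an out-of-range
-- price[jdx], i.e. every cost entry past index len(price)-1 is ≥ every price (else IndexError).
def Pre_solution (price : List Int) (cost : List Int) : Prop :=
  price ≠ [] ∧ ∀ c ∈ cost.drop price.length, ∀ p ∈ price, p ≤ c
instance (price : List Int) (cost : List Int) : Decidable (Pre_solution price cost) := by
  unfold Pre_solution; infer_instance

def pvWitness_solution : List Int × List Int := ([1], [0])

-- spec-level aggregated difference of a price value v: sum of v - c over pairs with c < v ≤ q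
def dAns (price : List Int) (cost : List Int) (v : Int) : Int :=
  ((List.zip cost price).map (fun cq => if v > cq.1 ∧ v ≤ cq.2 then v - cq.1 else 0)).sum

def ansL (price : List Int) (cost : List Int) : List Int := price.map (dAns price cost)

-- On inputs whose maximal aggregated difference is positive but attained only at prices above
-- 10^9, A returns its INF initialiser 1000000000 instead of any actual price, while B returns
-- the true minimal such price, which is the intended result.
def D_solution (price : List Int) (cost : List Int) : Prop :=
  0 < (ansL price cost).foldl max 0 ∧
  ∀ p ∈ price, dAns price cost p = (ansL price cost).foldl max 0 → 1000000000 < p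
instance (price : List Int) (cost : List Int) : Decidable (D_solution price cost) := by
  unfold D_solution; infer_instance

def Spec_solution (price : List Int) (cost : List Int) (out : Int) : Prop := ¬ D_solution price cost → out = solution_alt price cost
instance (price : List Int) (cost : List Int) (out : Int) : Decidable (Spec_solution price cost out) := by unfold Spec_solution; infer_instance

def pvDiffWitness_solution : List Int × List Int := ([2000000000], [1])
def pvDiffWitnessOut_solution : Int × Int := (1000000000, 2000000000)

-- ===== CLAIM (what is proved, stated in full; the proofs are below) =====
def Claim_unchanged_solution : Prop := ∀ (price : List Int) (cost : List Int), Dom_solution price cost → Pre_solution price cost → Spec_solution price cost (solution price cost)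
def Claim_changed_solution : Prop := Dom_solution (pvDiffWitness_solution.1) (pvDiffWitness_solution.2) ∧ Pre_solution (pvDiffWitness_solution.1) (pvDiffWitness_solution.2) ∧ D_solution (pvDiffWitness_solution.1) (pvDiffWitness_solution.2) ∧ solution (pvDiffWitness_solution.1) (pvDiffWitness_solution.2) = pvDiffWitnessOut_solution.1 ∧ solution_alt (pvDiffWitness_solution.1) (pvDiffWitness_solution.2) = pvDiffWitnessOut_solution.2 ∧ pvDiffWitnessOut_solution.1 ≠ pvDiffWitnessOut_solution.2
def Claim_exact_solution : Prop := ∀ (price : List Int) (cost : List Int), Dom_solution price cost → Pre_solution price cost → D_solution price cost → solution price cost ≠ solution_alt price cost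

-- ===== LEMMAS AND PROOFS =====

theorem inner_fold (price : List Int) (v : Int) (idx : Nat) :
    ∀ (cost' : List Int) (s : Nat) (ans : List Int), idx < ans.length →
    (PySem.List.enumerate cost' (s : Int)).foldl (fun ans jdxj =>
        match PySem.List.pyGet? price jdxj.1 with
        | some pj => if v > jdxj.2 ∧ v ≤ pj then ans.set idx (ans.getD idx 0 + (v - jdxj.2)) else ans
        | none => ans) ans
      = ans.set idx (ans.getD idx 0 +
          ((List.zip cost' (price.drop s)).map (fun cq => if v > cq.1 ∧ v ≤ cq.2 then v - cq.1 else 0)).sum) := by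
  intro cost'
  induction cost' with
  | nil =>
    intro s ans hidx
    rw [PySem.List.enumerate_nil]
    simp only [List.foldl_nil, List.zip_nil_left, List.map_nil, List.sum_nil, add_zero]
    rw [List.getD_eq_getElem _ _ hidx, List.set_getElem_self]
  | cons c rest ih =>
    intro s ans hidx
    by_cases hs : s < price.length
    case neg =>
      -- out-of-range region: the indexed lookup misses and every step is skipped
      have hdrop : price.drop s = [] := List.drop_eq_nil_of_le (by omega)
      have hdrop' : price.drop (s+1) = [] := List.drop_eq_nil_of_le (by omega)
      have hget : PySem.List.pyGet? price (s : Int) = none := by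
        rw [PySem.List.pyGet?_natCast, List.getElem?_eq_none (by omega)]
      rw [PySem.List.enumerate_cons, List.foldl_cons]
      have hstep : (match PySem.List.pyGet? price (s : Int) with
          | some pj => if v > c ∧ v ≤ pj then ans.set idx (ans.getD idx 0 + (v - c)) else ans
          | none => ans) = ans := by
        rw [hget]
      rw [hstep, show ((s : Int) + 1) = ((s + 1 : Nat) : Int) by push_cast; ring,
        ih (s+1) _ hidx, hdrop, hdrop']
      simp only [List.zip_nil_right, List.map_nil, List.sum_nil, add_zero]
    rw [PySem.List.enumerate_cons]
    rw [List.drop_eq_getElem_cons hs]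
    simp only [List.foldl_cons, List.zip_cons_cons, List.map_cons, List.sum_cons]
    have hget : PySem.List.pyGet? price (s : Int) = some price[s] := by
      rw [PySem.List.pyGet?_natCast]; simp [hs]
    have hstep : (match PySem.List.pyGet? price (s : Int) with
        | some pj => if v > c ∧ v ≤ pj then ans.set idx (ans.getD idx 0 + (v - c)) else ans
        | none => ans) = if v > c ∧ v ≤ price[s] then ans.set idx (ans.getD idx 0 + (v - c)) else ans := by
      rw [hget]
    rw [hstep]
    have hcast : ((s : Int) + 1) = ((s + 1 : Nat) : Int) := by push_cast; ring
    by_cases hc : v > c ∧ v ≤ price[s]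
    · rw [if_pos hc, hcast]
      rw [ih (s+1) _ (by simpa using hidx)]
      rw [List.set_set, List.getD_eq_getElem _ _ (by simpa using hidx), List.getElem_set_self,
        List.getD_eq_getElem _ _ hidx, if_pos hc]
      ring_nf
    · rw [if_neg hc, hcast]
      rw [ih (s+1) _ hidx, if_neg hc]
      ring_nf

theorem set_append_cons (d t : List Int) (x y : Int) : (d ++ x :: t).set d.length y = d ++ y :: t := by
  induction d with
  | nil => simp
  | cons a d ih => simp [List.set_cons_succ, ih]

theorem outer_fold (price cost : List Int) :
    ∀ (suff : List Int) (k : Nat) (done : List Int), done.length = k → k + suff.length = price.length →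
    (PySem.List.enumerate suff (k : Int)).foldl (fun ans idxi =>
        (PySem.List.enumerate cost).foldl (fun ans jdxj =>
          match PySem.List.pyGet? price jdxj.1 with
          | some pj => if idxi.2 > jdxj.2 ∧ idxi.2 ≤ pj then
              ans.set idxi.1.toNat (ans.getD idxi.1.toNat 0 + (idxi.2 - jdxj.2)) else ans
          | none => ans) ans) (done ++ List.replicate suff.length 0)
      = done ++ suff.map (dAns price cost) := by
  intro suff
  induction suff with
  | nil => intro k done _ _; simp [PySem.List.enumerate_nil]
  | cons v rest ih =>
    intro k done hd hk
    rw [PySem.List.enumerate_cons, List.foldl_cons]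
    have hrepl : List.replicate (v :: rest).length (0 : Int) = 0 :: List.replicate rest.length 0 := by
      simp [List.replicate]
    rw [hrepl]
    have hlen : ((k : Int)).toNat = k := by simp
    have hlt : k < (done ++ (0:Int) :: List.replicate rest.length 0).length := by
      simp [hd]
    have hin := inner_fold price v k cost 0 (done ++ (0:Int) :: List.replicate rest.length 0) hlt
    simp only [Nat.cast_zero] at hin
    rw [hlen]
    simp only []
    rw [hin]
    have hgetD : (done ++ (0:Int) :: List.replicate rest.length 0).getD k 0 = 0 := by
      rw [List.getD_eq_getElem _ _ hlt]
      rw [List.getElem_append_right (by omega)]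
      simp [hd]
    rw [hgetD, List.drop_zero, zero_add]
    have hset : (done ++ (0:Int) :: List.replicate rest.length 0).set k (dAns price cost v)
        = (done ++ [dAns price cost v]) ++ List.replicate rest.length 0 := by
      rw [← hd, set_append_cons]
      simp
    rw [show ((List.zip cost price).map (fun cq => if v > cq.1 ∧ v ≤ cq.2 then v - cq.1 else 0)).sum = dAns price cost v from rfl]
    rw [hset]
    have hcast : ((k : Int) + 1) = ((k + 1 : Nat) : Int) := by push_cast; ring
    rw [hcast]
    have := ih (k+1) (done ++ [dAns price cost v]) (by simp [hd]) (by simp at hk ⊢; omega)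
    rw [this]
    simp

theorem advInt_sorted (v : Int) :
    ∀ (xs : List Int), xs.Pairwise (· ≤ ·) → ∀ (c s : Int),
    advInt v xs c s = (c + (xs.countP (fun x => decide (x < v)) : Int),
      s + (xs.filter (fun x => decide (x < v))).sum,
      xs.filter (fun x => !decide (x < v))) := by
  intro xs
  induction xs with
  | nil => intro _ c s; simp [advInt]
  | cons x rest ih =>
    intro hp c s
    rw [List.pairwise_cons] at hp
    by_cases hx : x < v
    · simp only [advInt, if_pos hx]
      rw [ih hp.2 (c+1) (s+x)]
      simp [hx]
      constructor
      · push_cast; ring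
      · ring
    · simp only [advInt, if_neg hx]
      have hnone : ∀ y ∈ rest, ¬ (y < v) := fun y hy => by
        have := hp.1 y hy; omega
      have h1 : rest.countP (fun x => decide (x < v)) = 0 := by
        rw [List.countP_eq_zero]; intro y hy; simpa using hnone y hy
      have h2 : rest.filter (fun x => decide (x < v)) = [] := by
        rw [List.filter_eq_nil_iff]; intro y hy; simpa using hnone y hy
      have h3 : rest.filter (fun x => !decide (x < v)) = rest := by
        rw [List.filter_eq_self]; intro y hy; simpa using hnone y hy
      simp [hx, h1, h2, h3]

theorem advPair_sorted (v : Int) :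
    ∀ (xs : List (Int × Int)), xs.Pairwise (fun a b => a.1 ≤ b.1) → ∀ (c s : Int),
    advPair v xs c s = (c + (xs.countP (fun x => decide (x.1 < v)) : Int),
      s + ((xs.filter (fun x => decide (x.1 < v))).map Prod.snd).sum,
      xs.filter (fun x => !decide (x.1 < v))) := by
  intro xs
  induction xs with
  | nil => intro _ c s; simp [advPair]
  | cons x rest ih =>
    intro hp c s
    rw [List.pairwise_cons] at hp
    by_cases hx : x.1 < v
    · simp only [advPair, if_pos hx]
      rw [ih hp.2 (c+1) (s+x.2)]
      simp [hx]
      constructor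
      · push_cast; ring
      · ring
    · simp only [advPair, if_neg hx]
      have hnone : ∀ y ∈ rest, ¬ (y.1 < v) := fun y hy => by
        have := hp.1 y hy; omega
      have h1 : rest.countP (fun x => decide (x.1 < v)) = 0 := by
        rw [List.countP_eq_zero]; intro y hy; simpa using hnone y hy
      have h2 : rest.filter (fun x => decide (x.1 < v)) = [] := by
        rw [List.filter_eq_nil_iff]; intro y hy; simpa using hnone y hy
      have h3 : rest.filter (fun x => !decide (x.1 < v)) = rest := by
        rw [List.filter_eq_self]; intro y hy; simpa using hnone y hy
      simp [hx, h1, h2, h3]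

-- combination lemmas: p-filtered stats plus the stats of the remainder under q equal q's stats
theorem comb_countP {α : Type} (p q : α → Bool) (hpq : ∀ x, p x = true → q x = true) :
    ∀ (l : List α), l.countP p + (l.filter (fun x => !p x)).countP q = l.countP q := by
  intro l
  induction l with
  | nil => simp
  | cons x t ih =>
    by_cases hx : p x = true
    · simp [List.countP_cons, hx, hpq x hx, ← ih]; omega
    · simp only [Bool.not_eq_true] at hx
      simp [List.countP_cons, hx, ← ih]
      by_cases hq : q x = true <;> simp [hq] <;> omega

theorem comb_sumf {α : Type} (p q : α → Bool) (f : α → Int) (hpq : ∀ x, p x = true → q x = true) :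
    ∀ (l : List α),
    ((l.filter p).map f).sum + (((l.filter (fun x => !p x)).filter q).map f).sum
      = ((l.filter q).map f).sum := by
  intro l
  induction l with
  | nil => simp
  | cons x t ih =>
    by_cases hx : p x = true
    · simp [hx, hpq x hx, ← ih]; ring
    · simp only [Bool.not_eq_true] at hx
      by_cases hq : q x = true
      · simp [hx, hq, ← ih]; ring
      · simp [hx, hq, ← ih]

theorem comb_sum (p q : Int → Bool) (hpq : ∀ x, p x = true → q x = true) :
    ∀ (l : List Int),
    (l.filter p).sum + ((l.filter (fun x => !p x)).filter q).sum = (l.filter q).sum := by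
  intro l
  induction l with
  | nil => simp
  | cons x t ih =>
    by_cases hx : p x = true
    · simp [hx, hpq x hx, ← ih]; ring
    · simp only [Bool.not_eq_true] at hx
      by_cases hq : q x = true
      · simp [hx, hq, ← ih]; ring
      · simp [hx, hq, ← ih]

theorem comb_rem {α : Type} (p q : α → Bool) (hpq : ∀ x, p x = true → q x = true) (l : List α) :
    (l.filter (fun x => !p x)).filter (fun x => !q x) = l.filter (fun x => !q x) := by
  rw [List.filter_filter]
  apply List.filter_congr
  intro x _
  by_cases hq : q x = true
  · simp [hq]
  · simp [hq]
    cases hp : p x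
    · rfl
    · exact absurd (hpq x hp) hq

def pvG (C0 : List Int) (M0 : List (Int × Int)) (v : Int) : Int :=
  v * ((C0.countP (fun x => decide (x < v)) : Int) - (M0.countP (fun x => decide (x.1 < v)) : Int))
    - ((C0.filter (fun x => decide (x < v))).sum - ((M0.filter (fun x => decide (x.1 < v))).map Prod.snd).sum)

-- the invariant: before processing the next value (≥ b), the pointers' state is exactly
-- the < b prefix statistics of the sorted lists
def SweepInv (C0 : List Int) (M0 : List (Int × Int)) (b : Int) (st : SweepSt) : Prop :=
  st.r1 = C0.filter (fun x => !decide (x < b)) ∧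
  st.c1 = (C0.countP (fun x => decide (x < b)) : Int) ∧
  st.s1 = (C0.filter (fun x => decide (x < b))).sum ∧
  st.r2 = M0.filter (fun x => !decide (x.1 < b)) ∧
  st.c2 = (M0.countP (fun x => decide (x.1 < b)) : Int) ∧
  st.s2 = ((M0.filter (fun x => decide (x.1 < b))).map Prod.snd).sum

theorem sweep_get (C0 : List Int) (M0 : List (Int × Int))
    (hC : C0.Pairwise (· ≤ ·)) (hM : M0.Pairwise (fun a b => a.1 ≤ b.1)) :
    ∀ (rest : List Int), rest.Pairwise (· < ·) → ∀ (b : Int), (∀ v ∈ rest, b ≤ v) →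
    ∀ (st : SweepSt), SweepInv C0 M0 b st →
    ∀ (v : Int), ((rest.foldl sweepStep st).f).get? v
      = if v ∈ rest then some (pvG C0 M0 v) else st.f.get? v := by
  intro rest
  induction rest with
  | nil => intro _ b _ st _ v; simp
  | cons v0 t ih =>
    intro hp b hb st hinv v
    rw [List.pairwise_cons] at hp
    obtain ⟨h1, h2, h3, h4, h5, h6⟩ := hinv
    have hb0 : b ≤ v0 := hb v0 (by simp)
    have hCb : ∀ x : Int, decide (x < b) = true → decide (x < v0) = true := by
      intro x hx; simp at hx ⊢; omega
    have hMb : ∀ x : Int × Int, decide (x.1 < b) = true → decide (x.1 < v0) = true := by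
      intro x hx; simp at hx ⊢; omega
    have hCsorted : (C0.filter (fun x => !decide (x < b))).Pairwise (· ≤ ·) :=
      List.Pairwise.filter _ hC
    have hMsorted : (M0.filter (fun x => !decide (x.1 < b))).Pairwise (fun a b => a.1 ≤ b.1) :=
      List.Pairwise.filter _ hM
    have hstep : sweepStep st v0 = {
        r1 := C0.filter (fun x => !decide (x < v0)),
        c1 := (C0.countP (fun x => decide (x < v0)) : Int),
        s1 := (C0.filter (fun x => decide (x < v0))).sum,
        r2 := M0.filter (fun x => !decide (x.1 < v0)),
        c2 := (M0.countP (fun x => decide (x.1 < v0)) : Int),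
        s2 := ((M0.filter (fun x => decide (x.1 < v0))).map Prod.snd).sum,
        f := st.f.insert v0 (pvG C0 M0 v0) } := by
      unfold sweepStep
      rw [h1, h2, h3, h4, h5, h6]
      rw [advInt_sorted v0 _ hCsorted, advPair_sorted v0 _ hMsorted]
      simp only []
      congr 1
      · exact comb_rem _ _ hCb C0
      · rw [← comb_countP _ _ hCb C0]; push_cast; ring
      · rw [← comb_sum _ _ hCb C0]
      · exact comb_rem _ _ hMb M0
      · rw [← comb_countP _ _ hMb M0]; push_cast; ring
      · rw [← comb_sumf _ _ Prod.snd hMb M0]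
      · congr 1
        unfold pvG
        rw [← comb_countP _ _ hCb C0, ← comb_sum _ _ hCb C0,
          ← comb_countP _ _ hMb M0, ← comb_sumf _ _ Prod.snd hMb M0]
        push_cast; ring
    rw [List.foldl_cons, hstep]
    have hinv' : SweepInv C0 M0 v0 ({
        r1 := C0.filter (fun x => !decide (x < v0)),
        c1 := (C0.countP (fun x => decide (x < v0)) : Int),
        s1 := (C0.filter (fun x => decide (x < v0))).sum,
        r2 := M0.filter (fun x => !decide (x.1 < v0)),
        c2 := (M0.countP (fun x => decide (x.1 < v0)) : Int),
        s2 := ((M0.filter (fun x => decide (x.1 < v0))).map Prod.snd).sum,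
        f := st.f.insert v0 (pvG C0 M0 v0) } : SweepSt) := by
      exact ⟨rfl, rfl, rfl, rfl, rfl, rfl⟩
    rw [ih hp.2 v0 (fun w hw => le_of_lt (hp.1 w hw)) _ hinv' v]
    by_cases hv : v ∈ t
    · simp [hv]
    · by_cases hv0 : v = v0
      · subst hv0
        simp [hv, PySem.Dict.get?_insert_self]
      · have : v ∉ v0 :: t := by simp [hv, hv0]
        simp only [hv, if_false, this, if_false]
        rw [PySem.Dict.get?_insert]
        simp [hv0]

theorem pvG_perm (v : Int) (C C' : List Int) (M M' : List (Int × Int))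
    (hC : C.Perm C') (hM : M.Perm M') : pvG C M v = pvG C' M' v := by
  unfold pvG
  rw [hC.countP_eq, hM.countP_eq, (hC.filter _).sum_eq, ((hM.filter _).map Prod.snd).sum_eq]

theorem S_split (v : Int) :
    ∀ (l : List (Int × Int)),
    (l.map (fun cq => if v > cq.1 ∧ v ≤ cq.2 then v - cq.1 else 0)).sum
      = pvG (l.map Prod.fst) (l.map (fun cq => (max cq.1 cq.2, cq.1))) v := by
  intro l
  induction l with
  | nil => simp [pvG]
  | cons cq t ih =>
    simp only [List.map_cons, List.sum_cons, ih, pvG]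
    by_cases hc : cq.1 < v
    · by_cases hq : v ≤ cq.2
      · have hmx : ¬ (max cq.1 cq.2 < v) := by omega
        simp [List.countP_cons, List.filter_cons, hc, hq, hmx]
        push_cast; ring
      · have hmx : max cq.1 cq.2 < v := by omega
        have : ¬ (v > cq.1 ∧ v ≤ cq.2) := by omega
        simp [List.countP_cons, List.filter_cons, hc, hmx, hq, this]
    · have hmx : ¬ (max cq.1 cq.2 < v) := by omega
      have : ¬ (v > cq.1 ∧ v ≤ cq.2) := by omega
      simp [List.countP_cons, List.filter_cons, hc, hmx, this]

theorem foldl_min_shift : ∀ (t : List Int) (a b : Int), t.foldl min (min a b) = min a (t.foldl min b) := by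
  intro t
  induction t with
  | nil => intro a b; simp
  | cons x t ih =>
    intro a b
    simp only [List.foldl_cons]
    rw [min_assoc, ih]

theorem tail_fold (price : List Int) (m : Int) :
    ∀ (ans' : List Int) (s : Nat) (r : Int), s + ans'.length ≤ price.length →
    ((((PySem.List.enumerate ans' (s : Int)).filter (fun p => decide (p.2 = m))).map (fun p => p.1)).foldl
        (fun result i =>
          match PySem.List.pyGet? price i with
          | some pi => if result > pi then pi else result
          | none => result) r)
      = (((List.zip (price.drop s) ans').filter (fun pa => decide (pa.2 = m))).map Prod.fst).foldl min r := by
  intro ans'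
  induction ans' with
  | nil => intro s r _; simp [PySem.List.enumerate_nil]
  | cons a rest ih =>
    intro s r hlen
    have hs : s < price.length := by simp at hlen; omega
    rw [PySem.List.enumerate_cons, List.drop_eq_getElem_cons hs, List.zip_cons_cons]
    have hget : PySem.List.pyGet? price (s : Int) = some price[s] := by
      rw [PySem.List.pyGet?_natCast]; simp [hs]
    have hcast : ((s : Int) + 1) = ((s + 1 : Nat) : Int) := by push_cast; ring
    by_cases ha : a = m
    · simp only [List.filter_cons, ha, decide_true, if_true, List.map_cons, List.foldl_cons, hcast]
      rw [ih (s+1) _ (by simp at hlen ⊢; omega)]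
      have hmin : (match PySem.List.pyGet? price ((s:Nat) : Int) with
          | some pi => if r > pi then pi else r
          | none => r) = min r price[s] := by
        rw [hget]
        simp only []
        rw [min_def]
        by_cases h : r > price[s]
        · rw [if_pos h, if_neg (by omega)]
        · rw [if_neg h, if_pos (by omega)]
      rw [hmin]
    · simp only [List.filter_cons, decide_eq_true_eq, ha, if_false, hcast]
      rw [ih (s+1) _ (by simp at hlen ⊢; omega)]

theorem answerA_eq (price cost : List Int) :
    (PySem.List.enumerate price).foldl (fun ans idxi =>
      (PySem.List.enumerate cost).foldl (fun ans jdxj =>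
        match PySem.List.pyGet? price jdxj.1 with
        | some pj =>
          if idxi.2 > jdxj.2 ∧ idxi.2 ≤ pj then
            ans.set idxi.1.toNat (ans.getD idxi.1.toNat 0 + (idxi.2 - jdxj.2))
          else ans
        | none => ans) ans)
      (List.replicate price.length 0) = price.map (dAns price cost) := by
  have h := outer_fold price cost price 0 [] rfl (by simp)
  simp only [Nat.cast_zero, List.nil_append] at h
  exact h

theorem answerB_eq (price cost : List Int) (hdom : Dom_solution price cost) :
    price.map (fun v => (((PySem.List.sorted (PySem.Set.ofList price) (fun x => x) false).foldl sweepStep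
      ⟨PySem.List.sorted ((List.zip cost price).map Prod.fst) (fun x => x) false, 0, 0,
        PySem.List.sorted ((List.zip cost price).map (fun cq => (max cq.1 cq.2, cq.1))) Prod.fst false, 0, 0,
        PySem.Dict.empty⟩).f).getD v 0)
    = price.map (dAns price cost) := by
  simp only [Dom_solution, Bool.and_eq_true, List.all_eq_true] at hdom
  have hcost : ∀ c ∈ cost, (-2147483648 : Int) ≤ c := by
    intro c hc
    have := hdom.2 c hc
    simp [pvDomInt] at this
    omega
  set b0 : Int := -2147483649 with hb0def
  set C0 := PySem.List.sorted ((List.zip cost price).map Prod.fst) (fun x => x) false with hC0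
  set M0 := PySem.List.sorted ((List.zip cost price).map (fun cq => (max cq.1 cq.2, cq.1))) Prod.fst false with hM0
  have hCmem : ∀ x ∈ C0, b0 ≤ x := by
    intro x hx
    rw [hC0, PySem.List.mem_sorted] at hx
    obtain ⟨cq, hcq, rfl⟩ := List.mem_map.mp hx
    have := (List.of_mem_zip hcq).1
    have := hcost _ this
    omega
  have hMmem : ∀ x ∈ M0, b0 ≤ x.1 := by
    intro x hx
    rw [hM0, PySem.List.mem_sorted] at hx
    obtain ⟨cq, hcq, rfl⟩ := List.mem_map.mp hx
    have := (List.of_mem_zip hcq).1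
    have := hcost _ this
    simp only []
    omega
  have hC : C0.Pairwise (· ≤ ·) := PySem.List.sorted_pairwise ..
  have hM : M0.Pairwise (fun a b => a.1 ≤ b.1) := PySem.List.sorted_pairwise ..
  have hvals : (PySem.List.sorted (PySem.Set.ofList price) (fun x => x) false).Pairwise (· < ·) :=
    PySem.List.sorted_ofList_pairwise_lt ..
  have hblo : ∀ v ∈ PySem.List.sorted (PySem.Set.ofList price) (fun x => x) false, b0 ≤ v := by
    intro v hv
    rw [PySem.List.mem_sorted, PySem.Set.mem_ofList] at hv
    have := hdom.1 v hv
    simp [pvDomInt] at this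
    omega
  have hinv : SweepInv C0 M0 b0 ⟨C0, 0, 0, M0, 0, 0, PySem.Dict.empty⟩ := by
    have e1 : C0.filter (fun x => !decide (x < b0)) = C0 :=
      List.filter_eq_self.mpr (fun x hx => by simp; have := hCmem x hx; omega)
    have e2 : C0.countP (fun x => decide (x < b0)) = 0 :=
      List.countP_eq_zero.mpr (fun x hx => by simp; have := hCmem x hx; omega)
    have e3 : C0.filter (fun x => decide (x < b0)) = [] :=
      List.filter_eq_nil_iff.mpr (fun x hx => by simp; have := hCmem x hx; omega)
    have e4 : M0.filter (fun x => !decide (x.1 < b0)) = M0 :=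
      List.filter_eq_self.mpr (fun x hx => by simp; have := hMmem x hx; omega)
    have e5 : M0.countP (fun x => decide (x.1 < b0)) = 0 :=
      List.countP_eq_zero.mpr (fun x hx => by simp; have := hMmem x hx; omega)
    have e6 : M0.filter (fun x => decide (x.1 < b0)) = [] :=
      List.filter_eq_nil_iff.mpr (fun x hx => by simp; have := hMmem x hx; omega)
    refine ⟨e1.symm, ?_, ?_, e4.symm, ?_, ?_⟩
    · simp [e2]
    · simp [e3]
    · simp [e5]
    · simp [e6]
  apply List.map_congr_left
  intro v hv
  have hvin : v ∈ PySem.List.sorted (PySem.Set.ofList price) (fun x => x) false := by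
    rw [PySem.List.mem_sorted, PySem.Set.mem_ofList]; exact hv
  have hget := sweep_get C0 M0 hC hM _ hvals b0 hblo _ hinv v
  rw [if_pos hvin] at hget
  have hgetD : ∀ (d : PySem.Dict Int Int), d.get? v = some (pvG C0 M0 v) → d.getD v 0 = pvG C0 M0 v := by
    intro d hd
    unfold PySem.Dict.getD
    rw [hd]
    rfl
  rw [hgetD _ hget]
  have hperm := pvG_perm v C0 ((List.zip cost price).map Prod.fst) M0
    ((List.zip cost price).map (fun cq => (max cq.1 cq.2, cq.1)))
    (PySem.List.sorted_perm ..) (PySem.List.sorted_perm ..)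
  rw [hperm, ← S_split]
  rfl

theorem dAns_nonneg (price cost : List Int) (v : Int) : 0 ≤ dAns price cost v := by
  unfold dAns
  apply List.sum_nonneg
  intro x hx
  obtain ⟨cq, -, rfl⟩ := List.mem_map.mp hx
  split_ifs with h
  · omega
  · exact le_refl 0

theorem foldl_max_le (m : Int) : ∀ (l : List Int) (a : Int), a ≤ m → (∀ y ∈ l, y ≤ m) → l.foldl max a ≤ m := by
  intro l
  induction l with
  | nil => intro a ha _; simpa using ha
  | cons x t ih =>
    intro a ha hall
    rw [List.foldl_cons]
    exact ih _ (by have := hall x (by simp); omega) (fun y hy => hall y (by simp [hy]))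

theorem le_foldl_max_init : ∀ (l : List Int) (a : Int), a ≤ l.foldl max a := by
  intro l
  induction l with
  | nil => intro a; simp
  | cons x t ih =>
    intro a
    rw [List.foldl_cons]
    have := ih (max a x)
    omega

theorem le_foldl_max_of_mem (y : Int) : ∀ (l : List Int) (a : Int), y ∈ l → y ≤ l.foldl max a := by
  intro l
  induction l with
  | nil => intro a h; cases h
  | cons x t ih =>
    intro a h
    rw [List.foldl_cons]
    rcases List.mem_cons.mp h with rfl | ht
    · have := le_foldl_max_init t (max a y); omega
    · exact ih _ ht

theorem foldl_min_le_init : ∀ (t : List Int) (a : Int), t.foldl min a ≤ a := by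
  intro t
  induction t with
  | nil => intro a; simp
  | cons x t ih =>
    intro a
    rw [List.foldl_cons]
    have := ih (min a x)
    omega

theorem foldl_min_le_of_mem (y : Int) : ∀ (t : List Int) (a : Int), y ∈ t → t.foldl min a ≤ y := by
  intro t
  induction t with
  | nil => intro a h; cases h
  | cons x t ih =>
    intro a h
    rw [List.foldl_cons]
    rcases List.mem_cons.mp h with rfl | ht
    · have := foldl_min_le_init t (min a y); omega
    · exact ih _ ht

theorem zip_map_self (f : Int → Int) : ∀ (l : List Int), l.zip (l.map f) = l.map (fun p => (p, f p)) := by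
  intro l
  induction l with
  | nil => simp
  | cons x t ih => simp [ih]

theorem mem_qual_iff (price cost : List Int) (m p : Int) :
    p ∈ ((List.zip price (price.map (dAns price cost))).filter (fun pa => decide (pa.2 = m))).map Prod.fst
      ↔ p ∈ price ∧ dAns price cost p = m := by
  rw [zip_map_self]
  constructor
  · rintro h
    obtain ⟨pa, hpa, rfl⟩ := List.mem_map.mp h
    obtain ⟨hpa1, hpa2⟩ := List.mem_filter.mp hpa
    obtain ⟨a, ha, rfl⟩ := List.mem_map.mp hpa1
    exact ⟨ha, by simpa using hpa2⟩
  · rintro ⟨hp, hm⟩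
    exact List.mem_map.mpr ⟨(p, dAns price cost p), List.mem_filter.mpr
      ⟨List.mem_map.mpr ⟨p, hp, rfl⟩, by simpa using hm⟩, rfl⟩

theorem max_foldl_eq (price cost : List Int) (m : Int)
    (h : PySem.List.max? (price.map (dAns price cost)) (fun x => x) = some m) :
    (ansL price cost).foldl max 0 = m := by
  have hmem : m ∈ price.map (dAns price cost) := PySem.List.max?_mem h
  have hub : ∀ y ∈ price.map (dAns price cost), y ≤ m := by
    intro y hy
    simpa using PySem.List.max?_isMax h y hy
  have h0 : 0 ≤ m := by
    obtain ⟨p, -, rfl⟩ := List.mem_map.mp hmem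
    exact dAns_nonneg _ _ _
  unfold ansL
  exact le_antisymm (foldl_max_le m _ 0 h0 hub) (le_foldl_max_of_mem m _ 0 hmem)

-- ===== VERDICT =====
theorem solution_spec : Claim_unchanged_solution := by
  intro price cost hdom hpre hnD
  show solution price cost = solution_alt price cost
  unfold solution solution_alt
  simp only []
  rw [answerA_eq price cost, answerB_eq price cost hdom]
  cases hm : PySem.List.max? (price.map (dAns price cost)) (fun x => x) with
  | none => rfl
  | some m =>
    by_cases hm0 : m = 0
    · simp [hm0]
    · simp only [if_neg hm0]
      rw [PySem.List.foldl_append_ite (fun (p : Int × Int) => p.2 = m) (fun p => p.1)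
        (PySem.List.enumerate (price.map (dAns price cost))) [], List.nil_append]
      have hT := tail_fold price m (price.map (dAns price cost)) 0 1000000000 (by simp)
      simp only [Nat.cast_zero, List.drop_zero] at hT
      rw [hT]
      have hmm : m ∈ price.map (dAns price cost) := PySem.List.max?_mem hm
      obtain ⟨p0, hp0, hp0m⟩ := List.mem_map.mp hmm
      have hp0q : p0 ∈ ((List.zip price (price.map (dAns price cost))).filter
          (fun pa => decide (pa.2 = m))).map Prod.fst :=
        (mem_qual_iff price cost m p0).mpr ⟨hp0, hp0m⟩
      cases hqc : ((List.zip price (price.map (dAns price cost))).filter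
          (fun pa => decide (pa.2 = m))).map Prod.fst with
      | nil => rw [hqc] at hp0q; cases hp0q
      | cons x t =>
        rw [PySem.List.min?_id_cons]
        simp only []
        rw [List.foldl_cons, foldl_min_shift]
        apply min_eq_right
        -- from ¬D_: some price attaining the maximum is ≤ 10^9
        have hMeq := max_foldl_eq price cost m hm
        have h0m : 0 < m := by
          have h0 : 0 ≤ m := by
            obtain ⟨p, -, rfl⟩ := List.mem_map.mp hmm
            exact dAns_nonneg _ _ _
          omega
        unfold D_solution at hnD
        push_neg at hnD
        obtain ⟨p, hp, hpm, hple⟩ := hnD (by rw [hMeq]; exact h0m)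
        have hpq : p ∈ ((List.zip price (price.map (dAns price cost))).filter
            (fun pa => decide (pa.2 = m))).map Prod.fst :=
          (mem_qual_iff price cost m p).mpr ⟨hp, by rw [hpm, hMeq]⟩
        rw [hqc] at hpq
        rcases List.mem_cons.mp hpq with rfl | ht
        · have := foldl_min_le_init t p; omega
        · have := foldl_min_le_of_mem p t x ht; omega

theorem solution_changed : Claim_changed_solution := by
  unfold Claim_changed_solution; decide

theorem solution_tight : Claim_exact_solution := by
  intro price cost hdom hpre hD
  obtain ⟨hne, -⟩ := hpre
  obtain ⟨hpos, hbig⟩ := hD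
  unfold solution solution_alt
  simp only []
  rw [answerA_eq price cost, answerB_eq price cost hdom]
  cases hm : PySem.List.max? (price.map (dAns price cost)) (fun x => x) with
  | none =>
    exact absurd (List.map_eq_nil_iff.mp ((PySem.List.max?_eq_none_iff _ _).mp hm)) hne
  | some m =>
    have hMeq := max_foldl_eq price cost m hm
    have hm0 : m ≠ 0 := by omega
    simp only [if_neg hm0]
    rw [PySem.List.foldl_append_ite (fun (p : Int × Int) => p.2 = m) (fun p => p.1)
      (PySem.List.enumerate (price.map (dAns price cost))) [], List.nil_append]
    have hT := tail_fold price m (price.map (dAns price cost)) 0 1000000000 (by simp)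
    simp only [Nat.cast_zero, List.drop_zero] at hT
    rw [hT]
    have hmm : m ∈ price.map (dAns price cost) := PySem.List.max?_mem hm
    obtain ⟨p0, hp0, hp0m⟩ := List.mem_map.mp hmm
    have hp0q : p0 ∈ ((List.zip price (price.map (dAns price cost))).filter
        (fun pa => decide (pa.2 = m))).map Prod.fst :=
      (mem_qual_iff price cost m p0).mpr ⟨hp0, hp0m⟩
    cases hqc : ((List.zip price (price.map (dAns price cost))).filter
        (fun pa => decide (pa.2 = m))).map Prod.fst with
    | nil => rw [hqc] at hp0q; cases hp0q
    | cons x t =>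
      rw [PySem.List.min?_id_cons]
      simp only []
      rw [List.foldl_cons, foldl_min_shift]
      have hr_mem : t.foldl min x ∈ ((List.zip price (price.map (dAns price cost))).filter
          (fun pa => decide (pa.2 = m))).map Prod.fst := by
        rw [hqc]
        exact PySem.List.min?_mem (PySem.List.min?_id_cons x t)
      obtain ⟨hrp, hrm⟩ := (mem_qual_iff price cost m _).mp hr_mem
      have hr_big : 1000000000 < t.foldl min x := hbig _ hrp (by rw [hrm, hMeq])
      rw [min_eq_left (le_of_lt hr_big)]
      omega
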